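-- pv_equiv track=rewrite | github.com/ygina/sidekick | rs-montgomery-multiplication-demo/src/crt.py | gcd_from_factors
-- ===== SOURCE A (Python) =====
-- def gcd_from_factors(a, b):
--     gcd = 1
--     factors = []
--     for af, bf in zip(a, b):
--         mf = af if af[1] <= bf[1] else bf
--         factors.append(mf)
--         gcd *= mf[0]**mf[1]
--     return gcd, factors
-- ===== SOURCE B (Python) =====
-- # Recursive: recurse on the heads, cons the chosen factor, multiply on the way back.
-- def gcd_from_factors(a, b):
--     if not a or not b:
--         return 1, []
--     (p, e), (q, f) = a[0], b[0]
--     mf = (p, e) if e <= f else (q, f)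
--     g, rest = gcd_from_factors(a[1:], b[1:])
--     return mf[0] ** mf[1] * g, [mf] + rest
-- ===== Notes on version B (the rewrite author's own statement) =====
-- stated objective: alternative
-- what changed: B replaces A's iterative fold (left-to-right product, appending to an accumulator list) by structural recursion on the two lists that conses each chosen factor and multiplies the prime powers right-to-left on the way back out of the recursion; Pre_ excludes negative selected exponents, where Python's ** leaves int.
-- outside the precondition, e.g. on gcd_from_factors([(2, -1)], [(2, 3)]): A returns (0.5, [(2, -1)]), B returns (0.5, [(2, -1)])
import Mathlib
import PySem

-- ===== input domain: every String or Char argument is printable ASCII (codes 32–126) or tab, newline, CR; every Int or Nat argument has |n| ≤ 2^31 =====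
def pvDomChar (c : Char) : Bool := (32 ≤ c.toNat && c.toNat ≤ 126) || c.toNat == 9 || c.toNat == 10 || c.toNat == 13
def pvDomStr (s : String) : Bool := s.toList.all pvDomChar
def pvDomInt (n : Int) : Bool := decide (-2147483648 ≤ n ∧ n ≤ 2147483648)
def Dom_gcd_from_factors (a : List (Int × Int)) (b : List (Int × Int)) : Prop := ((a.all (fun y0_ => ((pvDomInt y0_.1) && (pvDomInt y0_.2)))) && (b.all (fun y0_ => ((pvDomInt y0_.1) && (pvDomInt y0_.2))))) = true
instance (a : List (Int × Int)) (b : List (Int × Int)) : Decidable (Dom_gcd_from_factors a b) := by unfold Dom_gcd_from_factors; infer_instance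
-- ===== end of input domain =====

-- B replaces A's iterative fold by structural recursion on the two lists,
-- consing the chosen factor and multiplying right-to-left on the way back.

-- ===== PORT A =====
-- A: one loop over zip(a,b) accumulating (gcd, factors) together, left to right.
def gcd_from_factors (a : List (Int × Int)) (b : List (Int × Int)) : Int × (List (Int × Int)) :=
  let r := (List.zip a b).foldl
    (fun (s : Int × List (Int × Int)) p =>
      let mf := if p.1.2 ≤ p.2.2 then p.1 else p.2
      (s.1 * mf.1 ^ mf.2.toNat, s.2 ++ [mf]))
    (1, [])
  (r.1, r.2)

-- ===== PORT B =====
-- B: recursion on the heads; cons the chosen factor, multiply on return.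
def gcd_from_factors_alt (a : List (Int × Int)) (b : List (Int × Int)) : Int × (List (Int × Int)) :=
  match a, b with
  | (p, e) :: ta, (q, f) :: tb =>
    let mf := if e ≤ f then (p, e) else (q, f)
    let r := gcd_from_factors_alt ta tb
    (mf.1 ^ mf.2.toNat * r.1, mf :: r.2)
  | _, _ => (1, [])

-- ===== PRECONDITION & SPEC =====
-- Pre_ excludes pairs whose selected exponent is negative: there Python's '**'
-- yields a float (or raises ZeroDivisionError for base 0), not an int.
def Pre_gcd_from_factors (a : List (Int × Int)) (b : List (Int × Int)) : Prop :=
  ((List.zip a b).all (fun p => decide (0 ≤ min p.1.2 p.2.2))) = true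
instance (a : List (Int × Int)) (b : List (Int × Int)) : Decidable (Pre_gcd_from_factors a b) := by unfold Pre_gcd_from_factors; infer_instance
def pvWitness_gcd_from_factors : (List (Int × Int)) × (List (Int × Int)) := ([(2, 3), (3, 1)], [(2, 1), (3, 2)])

def Spec_gcd_from_factors (a : List (Int × Int)) (b : List (Int × Int)) (out : Int × (List (Int × Int))) : Prop := out = gcd_from_factors_alt a b
instance (a : List (Int × Int)) (b : List (Int × Int)) (out : Int × (List (Int × Int))) : Decidable (Spec_gcd_from_factors a b out) := by unfold Spec_gcd_from_factors; infer_instance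

-- ===== CLAIM =====
def Claim_equal_gcd_from_factors : Prop := ∀ (a : List (Int × Int)) (b : List (Int × Int)), Dom_gcd_from_factors a b → Pre_gcd_from_factors a b → Spec_gcd_from_factors a b (gcd_from_factors a b)

-- ===== LEMMAS AND PROOFS =====
-- A's fused left fold, from any start state, equals B's recursive result
-- (product commuted to the left factor, factors appended).
theorem pv_fused_fold (a b : List (Int × Int)) (g : Int) (fs : List (Int × Int)) :
    (List.zip a b).foldl
      (fun (s : Int × List (Int × Int)) p =>
        let mf := if p.1.2 ≤ p.2.2 then p.1 else p.2
        (s.1 * mf.1 ^ mf.2.toNat, s.2 ++ [mf])) (g, fs)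
    = (g * (gcd_from_factors_alt a b).1, fs ++ (gcd_from_factors_alt a b).2) := by
  induction a generalizing b g fs with
  | nil => simp [gcd_from_factors_alt]
  | cons h t ih =>
    cases b with
    | nil => simp [gcd_from_factors_alt]
    | cons h' t' =>
      simp only [List.zip_cons_cons, List.foldl_cons, gcd_from_factors_alt, ih]
      obtain ⟨p, e⟩ := h; obtain ⟨q, f⟩ := h'
      by_cases hef : e ≤ f <;> simp [hef, mul_comm, mul_left_comm]

-- ===== VERDICT =====
theorem gcd_from_factors_spec : Claim_equal_gcd_from_factors := by
  intro a b _ _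
  unfold Spec_gcd_from_factors gcd_from_factors
  simp [pv_fused_fold]
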